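-- pv_equiv track=rewrite | github.com/jk-jung/problem-solving | codewars/6kyu/6_Sum of all numbers with the same digits (performance edition).py | sum_arrangements
-- ===== SOURCE A (Python) =====
-- from math import factorial
-- from collections import Counter
--
-- def sum_arrangements(n):
--     n = str(n)
--     c = Counter(map(int, n))
--     r = 0
--     x = (10 ** len(n) - 1) // 9
--
--     f = factorial(len(n) - 1)
--     for i in range(1, 10):
--         r += f * i * c[i] * x
--     return r
-- ===== SOURCE B (Python) =====
-- def sum_arrangements(n):
--     digits = tuple(int(d) for d in str(n))
--
--     def go(prefix, remaining):
--         if not remaining: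
--             return prefix
--         total = 0
--         p10 = prefix * 10
--         for i, d in enumerate(remaining):
--             total += go(p10 + d, remaining[:i] + remaining[i + 1:])
--         return total
--
--     return go(0, digits)
-- ===== Notes on version B (the rewrite author's own statement) =====
-- stated objective: alternative
-- what changed: Replaces A's closed-form positional formula (Counter, factorial, repunit) by a direct brute-force recursion that enumerates every digit arrangement (duplicates counted separately) and sums their values.
import Mathlib
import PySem

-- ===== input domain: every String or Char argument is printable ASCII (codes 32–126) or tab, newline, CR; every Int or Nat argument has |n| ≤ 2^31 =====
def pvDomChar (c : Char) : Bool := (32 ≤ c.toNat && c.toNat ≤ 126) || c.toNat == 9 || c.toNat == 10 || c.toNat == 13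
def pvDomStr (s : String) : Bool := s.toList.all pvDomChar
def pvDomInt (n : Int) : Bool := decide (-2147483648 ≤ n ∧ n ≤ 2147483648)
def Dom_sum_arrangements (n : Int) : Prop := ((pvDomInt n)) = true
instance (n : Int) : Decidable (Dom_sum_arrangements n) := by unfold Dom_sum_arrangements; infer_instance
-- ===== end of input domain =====

-- B replaces A's closed-form positional formula by a direct brute-force recursion that sums all
-- digit arrangements (duplicates counted separately), as the task defines; same values, factorially slower.


-- int(ch) for a one-character string, as both Pythons apply it to each character of str(n)
def pyIntOfChar (c : Char) : Int := (PySem.Int.ofStr? (String.ofList [c])).getD 0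

-- ===== PORT A =====
def sum_arrangements (n : Int) : Int :=
  let s : List Char := PySem.Int.toChars n                              -- n = str(n)
  let c : PySem.Dict Int Int := PySem.Dict.counter (s.map pyIntOfChar)  -- c = Counter(map(int, n))
  let x : Int := PySem.Int.floordiv (10 ^ s.length - 1) 9               -- x = (10 ** len(n) - 1) // 9
  let f : Int := (Nat.factorial (s.length - 1) : Int)                   -- f = factorial(len(n) - 1)
  (PySem.List.pyRange 1 10 1).foldl (fun r i => r + f * i * (c.getD i 0) * x) 0

-- ===== PORT B =====
-- (remaining[i], remaining[:i] + remaining[i+1:]) for each index i, in order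
def pvPicks : List Int → List (Int × List Int)
  | [] => []
  | x :: xs => (x, xs) :: (pvPicks xs).map (fun p => (p.1, x :: p.2))

-- go(prefix, remaining); the Nat argument is a totality fuel, = remaining.length at every call
def pvGo : Nat → Int → List Int → Int
  | 0, acc, _ => acc
  | k+1, acc, l => ((pvPicks l).map (fun p => pvGo k (acc * 10 + p.1) p.2)).sum

def sum_arrangements_alt (n : Int) : Int :=
  let ds : List Int := (PySem.Int.toChars n).map pyIntOfChar            -- digits = [int(d) for d in str(n)]
  pvGo ds.length 0 ds                                                   -- go(0, digits)

-- ===== PRECONDITION & SPEC =====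
-- Pre_ excludes exactly the negative n, where str(n) starts with '-' and int('-') raises ValueError in A (and in B).
def Pre_sum_arrangements (n : Int) : Prop := 0 ≤ n
instance (n : Int) : Decidable (Pre_sum_arrangements n) := by unfold Pre_sum_arrangements; infer_instance
def pvWitness_sum_arrangements : Int := (132)

def Spec_sum_arrangements (n : Int) (out : Int) : Prop := out = sum_arrangements_alt n
instance (n : Int) (out : Int) : Decidable (Spec_sum_arrangements n out) := by unfold Spec_sum_arrangements; infer_instance

-- ===== CLAIM (what is proved, stated in full; the proofs are below) =====
def Claim_equal_sum_arrangements : Prop := ∀ (n : Int), Dom_sum_arrangements n → Pre_sum_arrangements n → Spec_sum_arrangements n (sum_arrangements n)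

-- ===== LEMMAS AND PROOFS =====

-- repunit: pvRep k = (10^k - 1) / 9 = 11…1 (k ones)
def pvRep : Nat → Int
  | 0 => 0
  | k+1 => 10 * pvRep k + 1

def pvC (k : Nat) : Int := (Nat.factorial (k - 1) : Int) * pvRep k

lemma nine_mul_pvRep (k : Nat) : 9 * pvRep k = 10 ^ k - 1 := by
  induction k with
  | zero => simp [pvRep]
  | succ k ih => simp [pvRep, pow_succ]; ring_nf; ring_nf at ih; linarith

lemma pvRep_succ' (k : Nat) : pvRep (k+1) = pvRep k + 10 ^ k := by
  have h := nine_mul_pvRep k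
  simp only [pvRep]
  linarith

lemma sum_map_const_add {α : Type} (l : List α) (c : Int) (g : α → Int) :
    (l.map (fun a => c + g a)).sum = (l.length : Int) * c + (l.map g).sum := by
  induction l with
  | nil => simp
  | cons x xs ih => simp only [List.map_cons, List.sum_cons, List.length_cons, ih]; push_cast; ring

lemma sum_map_linear {α : Type} (l : List α) (c M N : Int) (f g : α → Int) :
    (l.map (fun a => c + (f a * M + N * g a))).sum
      = (l.length : Int) * c + (l.map f).sum * M + N * (l.map g).sum := by
  induction l with
  | nil => simp
  | cons x xs ih => simp only [List.map_cons, List.sum_cons, List.length_cons, ih]; push_cast; ring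

lemma pvPicks_length (l : List Int) : (pvPicks l).length = l.length := by
  induction l with
  | nil => simp [pvPicks]
  | cons x xs ih => simp [pvPicks, ih]

lemma pvPicks_snd_length (l : List Int) : ∀ p ∈ pvPicks l, p.2.length + 1 = l.length := by
  induction l with
  | nil => simp [pvPicks]
  | cons x xs ih =>
    intro p hp
    simp [pvPicks] at hp
    rcases hp with h | ⟨a, b, hab, rfl⟩
    · simp [h]
    · simpa using ih (a, b) hab

lemma pvPicks_fst_sum (l : List Int) : ((pvPicks l).map (fun p => p.1)).sum = l.sum := by
  induction l with
  | nil => simp [pvPicks]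
  | cons x xs ih => simp [pvPicks, List.map_map, Function.comp_def, ih]

lemma pvPicks_snd_sum (l : List Int) :
    ((pvPicks l).map (fun p => p.2.sum)).sum = ((l.length : Int) - 1) * l.sum := by
  induction l with
  | nil => simp [pvPicks]
  | cons x xs ih =>
    simp only [pvPicks, List.map_cons, List.map_map, Function.comp_def, List.sum_cons]
    have key := sum_map_const_add (pvPicks xs) x (fun p => p.2.sum)
    simp only at key
    rw [key, pvPicks_length, ih]
    simp only [List.length_cons]
    push_cast
    ring

-- the core: pvGo on a list of length k sums acc·10^k over all k! arrangements plus C k · (digit sum)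
lemma pvGo_eq (k : Nat) : ∀ (l : List Int) (acc : Int), l.length = k →
    pvGo k acc l = acc * 10 ^ k * (Nat.factorial k : Int) + pvC k * l.sum := by
  induction k with
  | zero =>
    intro l acc hl
    rw [List.length_eq_zero_iff] at hl
    subst hl
    simp [pvGo, pvC, pvRep]
  | succ k ih =>
    intro l acc hl
    have hlen : ∀ p ∈ pvPicks l, p.2.length = k := by
      intro p hp
      have := pvPicks_snd_length l p hp
      omega
    have hmap : (pvPicks l).map (fun p => pvGo k (acc * 10 + p.1) p.2)
        = (pvPicks l).map (fun p => (acc * 10 + p.1) * 10 ^ k * (Nat.factorial k : Int) + pvC k * p.2.sum) := by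
      apply List.map_congr_left
      intro p hp
      exact ih p.2 (acc * 10 + p.1) (hlen p hp)
    show ((pvPicks l).map (fun p => pvGo k (acc * 10 + p.1) p.2)).sum = _
    rw [hmap]
    have expand : ((pvPicks l).map (fun p => (acc * 10 + p.1) * 10 ^ k * (Nat.factorial k : Int) + pvC k * p.2.sum)).sum
        = ((pvPicks l).map (fun p => acc * 10 * 10 ^ k * (Nat.factorial k : Int)
              + (p.1 * (10 ^ k * (Nat.factorial k : Int)) + pvC k * p.2.sum))).sum := by
      apply congrArg
      apply List.map_congr_left
      intro p _
      ring
    rw [expand]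
    have key := sum_map_linear (pvPicks l) (acc * 10 * 10 ^ k * (Nat.factorial k : Int))
      (10 ^ k * (Nat.factorial k : Int)) (pvC k) (fun p => p.1) (fun p => p.2.sum)
    simp only at key
    rw [key, pvPicks_fst_sum, pvPicks_snd_sum, pvPicks_length, hl]
    have hfact : (Nat.factorial (k+1) : Int) = ((k:Int)+1) * (Nat.factorial k : Int) := by
      push_cast [Nat.factorial_succ]; ring
    have hC : pvC (k+1) = 10 ^ k * (Nat.factorial k : Int) + (k : Int) * pvC k := by
      unfold pvC
      rcases Nat.eq_zero_or_pos k with hk | hk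
      · subst hk; decide
      · have hk1 : k - 1 + 1 = k := by omega
        have hfk : (Nat.factorial k : Int) = (k : Int) * (Nat.factorial (k-1) : Int) := by
          have h : Nat.factorial k = k * Nat.factorial (k-1) := by
            conv_lhs => rw [← hk1]
            rw [Nat.factorial_succ, hk1]
          rw [h]
          push_cast
          ring
        simp only [Nat.add_sub_cancel, pvRep_succ']
        rw [hfk]
        ring
    rw [hfact, hC]
    push_cast
    ring

-- every character produced by Nat.toDigits 10 is one of the ten digit characters
lemma toDigitsCore_mem (b : Nat) (hb : b = 10) :
    ∀ (f n : Nat) (l : List Char) (c : Char), c ∈ Nat.toDigitsCore b f n l →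
      c ∈ l ∨ c ∈ ['0','1','2','3','4','5','6','7','8','9'] := by
  subst hb
  intro f
  induction f with
  | zero => intro n l c hc; exact Or.inl hc
  | succ f ih =>
    intro n l c hc
    have hdig : Nat.digitChar (n % 10) ∈ ['0','1','2','3','4','5','6','7','8','9'] := by
      have h10 : n % 10 < 10 := Nat.mod_lt _ (by norm_num)
      interval_cases h : n % 10 <;> simp [Nat.digitChar]
    simp only [Nat.toDigitsCore] at hc
    by_cases hz : n / 10 = 0
    · rw [if_pos hz] at hc
      rcases List.mem_cons.mp hc with rfl | h
      · exact Or.inr hdig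
      · exact Or.inl h
    · rw [if_neg hz] at hc
      rcases ih (n / 10) (Nat.digitChar (n % 10) :: l) c hc with h | h
      · rcases List.mem_cons.mp h with rfl | h'
        · exact Or.inr hdig
        · exact Or.inl h'
      · exact Or.inr h

lemma toChars_digits (n : Int) (hn : 0 ≤ n) :
    ∀ c ∈ PySem.Int.toChars n, c ∈ ['0','1','2','3','4','5','6','7','8','9'] := by
  intro c hc
  unfold PySem.Int.toChars at hc
  rw [if_neg (by omega)] at hc
  rcases toDigitsCore_mem 10 rfl _ _ [] c hc with h | h
  · simp at h
  · exact h

lemma pyIntOfChar_digit (c : Char) (hc : c ∈ ['0','1','2','3','4','5','6','7','8','9']) :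
    0 ≤ pyIntOfChar c ∧ pyIntOfChar c ≤ 9 := by
  fin_cases hc <;> decide

-- Σ_{i=1..9} i · count i ds = Σ ds, when every element of ds lies in [0,9]
lemma weighted_count_sum (ds : List Int) (h : ∀ d ∈ ds, 0 ≤ d ∧ d ≤ 9) :
    1 * (ds.count 1 : Int) + 2 * (ds.count 2 : Int) + 3 * (ds.count 3 : Int)
    + 4 * (ds.count 4 : Int) + 5 * (ds.count 5 : Int) + 6 * (ds.count 6 : Int)
    + 7 * (ds.count 7 : Int) + 8 * (ds.count 8 : Int) + 9 * (ds.count 9 : Int) = ds.sum := by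
  induction ds with
  | nil => simp
  | cons d t ih =>
    have hd := h d (List.mem_cons_self)
    have ht := ih (fun x hx => h x (List.mem_cons_of_mem _ hx))
    obtain ⟨h0, h9⟩ := hd
    interval_cases d <;>
      simp only [List.count_cons, List.sum_cons] <;>
      push_cast <;> simp <;> linarith [ht]

-- ===== VERDICT (by name: the statement is the Claim_ definition above) =====
theorem sum_arrangements_spec : Claim_equal_sum_arrangements := by
  intro n _ hpre
  unfold Spec_sum_arrangements sum_arrangements sum_arrangements_alt
  set s : List Char := PySem.Int.toChars n with hs
  set ds : List Int := s.map pyIntOfChar with hds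
  have hdig : ∀ d ∈ ds, 0 ≤ d ∧ d ≤ 9 := by
    intro d hd
    rw [hds] at hd
    rcases List.mem_map.mp hd with ⟨c, hc, rfl⟩
    exact pyIntOfChar_digit c (toChars_digits n hpre c hc)
  have hlen : ds.length = s.length := by simp [hds]
  -- B side
  rw [pvGo_eq ds.length ds 0 rfl]
  -- A side: expand the range-1-10 fold
  have hrange : PySem.List.pyRange 1 10 1 = [1,2,3,4,5,6,7,8,9] := by decide
  rw [hrange]
  simp only [List.foldl_cons, List.foldl_nil, zero_add]
  simp only [PySem.Dict.getD_counter]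
  -- x is the repunit
  have hx : PySem.Int.floordiv (10 ^ s.length - 1) 9 = pvRep s.length := by
    have : (10:Int) ^ s.length - 1 = 9 * pvRep s.length := by rw [nine_mul_pvRep]
    rw [this]
    unfold PySem.Int.floordiv
    exact Int.mul_fdiv_cancel_left _ (by norm_num)
  rw [hx]
  have hsum := weighted_count_sum ds hdig
  rw [hlen]
  unfold pvC
  linear_combination ((Nat.factorial (s.length - 1) : Int) * pvRep s.length) * hsum
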